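-- pv_equiv track=rewrite | github.com/serweryn617/AoC | 25/8/puzzle.py | add_connection
-- ===== SOURCE A (Python) =====
-- def add_connection(circuits, idx_a, idx_b):
--     added_to = []
--
--     for i, circuit in enumerate(circuits):
--         if idx_a in circuit and idx_b in circuit:
--             return 0
--         if idx_a in circuit or idx_b in circuit:
--             circuit.add(idx_a)
--             circuit.add(idx_b)
--             added_to.append(i)
--
--     if added_to:
--         base = circuits[added_to[0]]
--         for i in reversed(added_to[1:]):
--             base.update(circuits.pop(i))
--         return 1
--
--     circuits.append(set((idx_a, idx_b)))
--     return 1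
-- ===== SOURCE B (Python) =====
-- def add_connection(circuits, idx_a, idx_b):
--     # Owner index: map every node to the index of the circuit holding it,
--     # then answer with one flat case dispatch (no mutate-while-scanning).
--     owner = {}
--     for i, circuit in enumerate(circuits):
--         for node in circuit:
--             owner[node] = i
--     loc_a = owner.get(idx_a)
--     loc_b = owner.get(idx_b)
--     if loc_a is not None and loc_b is not None:
--         if loc_a == loc_b:
--             return 0
--         lo, hi = min(loc_a, loc_b), max(loc_a, loc_b)
--         circuits[lo].update(circuits.pop(hi))
--         return 1
--     if loc_a is not None:
--         circuits[loc_a].add(idx_b)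
--         return 1
--     if loc_b is not None:
--         circuits[loc_b].add(idx_a)
--         return 1
--     circuits.append({idx_a, idx_b})
--     return 1
-- ===== Notes on version B (the rewrite author's own statement) =====
-- stated objective: alternative
-- what changed: B replaces A's mutate-while-scanning loop with added_to bookkeeping by first building a dict mapping each node to the index of its circuit, then answering with one flat case dispatch on the two lookups (same circuit -> 0, two circuits -> merge, one -> add, none -> append). Pre_ excludes inputs where some circuit already contains both endpoints while idx_a or idx_b also occurs in a second circuit: they break the disjoint-components invariant and which circuit owns the shared endpoint is unspecified, so A's scan-order answer and B's dict answer are both defensible.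
-- outside the precondition, e.g. on add_connection([{1, 2}, {2, 3}], 1, 2): A returns 0, B returns 1
import Mathlib
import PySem

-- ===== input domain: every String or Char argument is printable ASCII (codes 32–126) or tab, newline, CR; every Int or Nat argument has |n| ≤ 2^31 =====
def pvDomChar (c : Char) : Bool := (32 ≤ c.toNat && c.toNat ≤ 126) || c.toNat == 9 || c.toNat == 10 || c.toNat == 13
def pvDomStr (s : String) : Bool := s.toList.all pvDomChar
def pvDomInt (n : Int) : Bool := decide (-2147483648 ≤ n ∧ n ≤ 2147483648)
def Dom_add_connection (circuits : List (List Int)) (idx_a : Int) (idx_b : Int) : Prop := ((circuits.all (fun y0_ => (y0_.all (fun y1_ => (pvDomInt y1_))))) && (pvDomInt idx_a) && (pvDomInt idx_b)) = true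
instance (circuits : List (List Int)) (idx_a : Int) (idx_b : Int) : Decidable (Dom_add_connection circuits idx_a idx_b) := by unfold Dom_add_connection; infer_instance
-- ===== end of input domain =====

-- ===== PORT A =====
-- B builds a node→circuit-index dict once and answers by a flat case dispatch (objective: alternative).
-- Both programs mutate `circuits` in place (add nodes, merge and pop sets, append); the equivalence
-- proved here is about the RETURN value only, so the ports drop the mutated list.
-- Literal port of A's scan: walks circuits with index i, returns none on the early `return 0`,
-- otherwise threads the added_to index list (the post-loop merge/append only mutates circuits
-- and returns 1 in both branches, so the port returns 1 whatever added_to is).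
def aLoop (idx_a idx_b : Int) : List (List Int) → Nat → List Nat → Option (List Nat)
  | [], _, added_to => some added_to
  | c :: rest, i, added_to =>
    if idx_a ∈ c ∧ idx_b ∈ c then none
    else if idx_a ∈ c ∨ idx_b ∈ c then aLoop idx_a idx_b rest (i + 1) (added_to ++ [i])
    else aLoop idx_a idx_b rest (i + 1) added_to

def add_connection (circuits : List (List Int)) (idx_a : Int) (idx_b : Int) : Int :=
  match aLoop idx_a idx_b circuits 0 [] with
  | none => 0          -- early `return 0`
  | some added_to =>   -- merge (added_to ≠ []) or append: both paths `return 1`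
    if added_to ≠ [] then 1 else 1

-- ===== PORT B =====
-- Port of Source B: `for i, circuit in enumerate(circuits): for node in circuit: owner[node] = i`.
def ownerLoop (i : Nat) (owner : PySem.Dict Int Int) : List (List Int) → PySem.Dict Int Int
  | [] => owner
  | c :: rest => ownerLoop (i + 1) (c.foldl (fun d node => d.insert node (Int.ofNat i)) owner) rest

-- Source B's dispatch on owner.get(idx_a) / owner.get(idx_b); the merge/add/append branches only
-- mutate circuits and all return 1, so the port returns 1 there.
def add_connection_alt (circuits : List (List Int)) (idx_a : Int) (idx_b : Int) : Int :=
  let owner := ownerLoop 0 PySem.Dict.empty circuits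
  match owner.get? idx_a, owner.get? idx_b with
  | some loc_a, some loc_b => if loc_a = loc_b then 0 else 1
  | some _, none => 1
  | none, some _ => 1
  | none, none => 1

-- ===== PRECONDITION & SPEC =====
-- Pre_ excludes inputs where some circuit already contains both endpoints while idx_a or idx_b
-- also occurs in a second circuit: such circuit lists break the disjoint-components invariant and
-- which circuit owns the shared endpoint is unspecified, so A's scan-order answer and B's dict
-- (last-write) answer are both defensible.
def Pre_add_connection (circuits : List (List Int)) (idx_a : Int) (idx_b : Int) : Prop :=
  (∃ c ∈ circuits, idx_a ∈ c ∧ idx_b ∈ c) →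
    List.Pairwise (fun c₁ c₂ => ¬(idx_a ∈ c₁ ∧ idx_a ∈ c₂) ∧ ¬(idx_b ∈ c₁ ∧ idx_b ∈ c₂)) circuits
instance (circuits : List (List Int)) (idx_a : Int) (idx_b : Int) : Decidable (Pre_add_connection circuits idx_a idx_b) := by unfold Pre_add_connection; infer_instance
def pvWitness_add_connection : List (List Int) × Int × Int := ([[1, 2], [3]], 1, 3)
def Spec_add_connection (circuits : List (List Int)) (idx_a : Int) (idx_b : Int) (out : Int) : Prop := out = add_connection_alt circuits idx_a idx_b
instance (circuits : List (List Int)) (idx_a : Int) (idx_b : Int) (out : Int) : Decidable (Spec_add_connection circuits idx_a idx_b out) := by unfold Spec_add_connection; infer_instance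

-- ===== CLAIM (what is proved, stated in full; the proofs are below) =====
def Claim_equal_add_connection : Prop := ∀ (circuits : List (List Int)) (idx_a : Int) (idx_b : Int), Dom_add_connection circuits idx_a idx_b → Pre_add_connection circuits idx_a idx_b → Spec_add_connection circuits idx_a idx_b (add_connection circuits idx_a idx_b)

-- ===== LEMMAS AND PROOFS =====
-- A's scan returns none exactly when some circuit contains both nodes.
theorem aLoop_none_iff (idx_a idx_b : Int) (l : List (List Int)) (i : Nat) (acc : List Nat) :
    aLoop idx_a idx_b l i acc = none ↔ ∃ c ∈ l, idx_a ∈ c ∧ idx_b ∈ c := by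
  induction l generalizing i acc with
  | nil => simp [aLoop]
  | cons c rest ih =>
    by_cases hb : idx_a ∈ c ∧ idx_b ∈ c
    · simp [aLoop, hb]
    · by_cases ho : idx_a ∈ c ∨ idx_b ∈ c <;> simp_all [aLoop]

-- inserting keys ≠ x does not change get? x
theorem get?_insertFold_not_mem (x v : Int) (c : List Int) (d : PySem.Dict Int Int)
    (hx : x ∉ c) :
    (c.foldl (fun d node => d.insert node v) d).get? x = d.get? x := by
  induction c generalizing d with
  | nil => rfl
  | cons y tail ih =>
    simp only [List.mem_cons, not_or] at hx
    simp only [List.foldl_cons]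
    rw [ih _ hx.2, PySem.Dict.get?_insert, if_neg hx.1]

theorem get?_insertFold_mem (x v : Int) (c : List Int) (d : PySem.Dict Int Int)
    (hx : x ∈ c) :
    (c.foldl (fun d node => d.insert node v) d).get? x = some v := by
  induction c generalizing d with
  | nil => cases hx
  | cons y tail ih =>
    simp only [List.foldl_cons]
    by_cases ht : x ∈ tail
    · exact ih _ ht
    · have hxy : x = y := (List.mem_cons.mp hx).resolve_right ht
      rw [get?_insertFold_not_mem x v tail _ ht, hxy, PySem.Dict.get?_insert_self]

theorem ownerLoop_get?_not_mem (x : Int) (l : List (List Int)) (i : Nat) (d : PySem.Dict Int Int)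
    (hx : ∀ c ∈ l, x ∉ c) :
    (ownerLoop i d l).get? x = d.get? x := by
  induction l generalizing i d with
  | nil => rfl
  | cons c rest ih =>
    simp only [ownerLoop]
    rw [ih _ _ (fun c hc => hx c (List.mem_cons_of_mem _ hc)),
      get?_insertFold_not_mem x _ c d (hx c (List.mem_cons_self ..))]

-- if x occurs in at most one circuit, the node found in the j-th circuit gets owner index i + j
theorem ownerLoop_get?_mem (x : Int) (l : List (List Int)) (i : Nat) (d : PySem.Dict Int Int)
    (hdisj : List.Pairwise (fun c₁ c₂ => ¬(x ∈ c₁ ∧ x ∈ c₂)) l)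
    (j : Nat) (hj : j < l.length) (hx : x ∈ l[j]) :
    (ownerLoop i d l).get? x = some (Int.ofNat (i + j)) := by
  induction l generalizing i d j with
  | nil => cases hj
  | cons c rest ih =>
    rcases List.pairwise_cons.mp hdisj with ⟨hhead, htail⟩
    cases j with
    | zero =>
      simp only [List.getElem_cons_zero] at hx
      simp only [ownerLoop]
      rw [ownerLoop_get?_not_mem x rest _ _ (fun c' hc' hx' => hhead c' hc' ⟨hx, hx'⟩),
        get?_insertFold_mem x _ c d hx, Nat.add_zero]
    | succ j' =>
      simp only [List.getElem_cons_succ] at hx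
      simp only [ownerLoop]
      rw [ih _ _ htail j' (Nat.lt_of_succ_lt_succ hj) hx]
      have harith : i + 1 + j' = i + (j' + 1) := by omega
      rw [harith]

-- without any disjointness, a successful lookup comes from some circuit containing the node
theorem ownerLoop_get?_cases (x : Int) (l : List (List Int)) (i : Nat) (d : PySem.Dict Int Int) :
    (ownerLoop i d l).get? x = d.get? x ∨
      ∃ j, ∃ _ : j < l.length, x ∈ l[j] ∧ (ownerLoop i d l).get? x = some (Int.ofNat (i + j)) := by
  induction l generalizing i d with
  | nil => exact Or.inl rfl
  | cons c rest ih =>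
    rcases ih (i + 1) (c.foldl (fun d node => d.insert node (Int.ofNat i)) d) with h | ⟨j, hj, hx, hv⟩
    · by_cases hc : x ∈ c
      · refine Or.inr ⟨0, Nat.succ_pos _, hc, ?_⟩
        rw [ownerLoop, h, get?_insertFold_mem x _ c d hc, Nat.add_zero]
      · refine Or.inl ?_
        rw [ownerLoop, h, get?_insertFold_not_mem x _ c d hc]
    · refine Or.inr ⟨j + 1, Nat.succ_lt_succ hj, hx, ?_⟩
      rw [ownerLoop, hv]
      congr 2
      omega

-- ===== VERDICT (by name: the statement is the Claim_ definition above) =====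
theorem add_connection_spec : Claim_equal_add_connection := by
  intro circuits idx_a idx_b _ hpre
  unfold Spec_add_connection add_connection add_connection_alt
  by_cases h : ∃ c ∈ circuits, idx_a ∈ c ∧ idx_b ∈ c
  · have hpa : List.Pairwise (fun c₁ c₂ => ¬(idx_a ∈ c₁ ∧ idx_a ∈ c₂)) circuits := (hpre h).imp (fun h => h.1)
    have hpb : List.Pairwise (fun c₁ c₂ => ¬(idx_b ∈ c₁ ∧ idx_b ∈ c₂)) circuits := (hpre h).imp (fun h => h.2)
    rw [(aLoop_none_iff idx_a idx_b circuits 0 []).mpr h]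
    rcases h with ⟨c, hc, ha, hb⟩
    rcases List.mem_iff_getElem.mp hc with ⟨j, hj, rfl⟩
    simp only
    rw [ownerLoop_get?_mem idx_a circuits 0 PySem.Dict.empty hpa j hj ha,
      ownerLoop_get?_mem idx_b circuits 0 PySem.Dict.empty hpb j hj hb]
    simp
  · rcases hn : aLoop idx_a idx_b circuits 0 [] with _ | added
    · exact absurd ((aLoop_none_iff idx_a idx_b circuits 0 []).mp hn) h
    · rcases hga : (ownerLoop 0 PySem.Dict.empty circuits).get? idx_a with _ | la <;>
        rcases hgb : (ownerLoop 0 PySem.Dict.empty circuits).get? idx_b with _ | lb <;>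
        simp only [hga, hgb]
      · split <;> rfl
      · split <;> rfl
      · split <;> rfl
      · -- both found: equal owner indices would exhibit a circuit containing both, contradicting h
        rcases ownerLoop_get?_cases idx_a circuits 0 PySem.Dict.empty with ha | ⟨ja, hja, hina, hva⟩
        · rw [ha] at hga; simp [PySem.Dict.get?_empty] at hga
        · rcases ownerLoop_get?_cases idx_b circuits 0 PySem.Dict.empty with hb | ⟨jb, hjb, hinb, hvb⟩
          · rw [hb] at hgb; simp [PySem.Dict.get?_empty] at hgb
          · have h1 := Option.some.inj (hva.symm.trans hga)
            have h2 := Option.some.inj (hvb.symm.trans hgb)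
            have h1' : (ja : Int) = la := by simpa using h1
            have h2' : (jb : Int) = lb := by simpa using h2
            have hne : la ≠ lb := by
              intro heq
              apply h
              have hj : ja = jb := by omega
              subst hj
              exact ⟨circuits[ja], List.getElem_mem _, hina, hinb⟩
            rw [if_neg hne]
            split <;> rfl
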